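-- pv_equiv track=rewrite | github.com/rcoh/ml | repo_tokenizer.py | breakup_identifiers
-- ===== SOURCE A (Python) =====
-- special_prefix = '~!~$'
--
-- ALL_CAPS = special_prefix + 'all_caps'
--
-- def breakup_identifiers(word: str):
--     if word.startswith(special_prefix):
--         return [word]
--     if '_' in word:
--         subwords = word.lower().split('_')
--     elif all([c.isupper() for c in word]):
--         subwords = [word.lower()]
--     else:
--         subwords = []
--         current_word = ''
--         for char in word:
--             if not char.islower():
--                 subwords.append(current_word)
--                 current_word = ''
--             current_word += char.lower()
--         subwords.append(current_word)
--     if all([not c.isalpha() or c.isupper() for c in word]) and any([c.isalpha() for c in word]):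
--         subwords.insert(0, ALL_CAPS)
--     return subwords
-- ===== SOURCE B (Python) =====
-- special_prefix = '~!~$'
--
-- ALL_CAPS = special_prefix + 'all_caps'
--
-- def breakup_identifiers(word: str):
--     if word.startswith(special_prefix):
--         return [word]
--     if '_' in word:
--         subwords = word.lower().split('_')
--     elif all(c.isupper() for c in word):
--         subwords = [word.lower()]
--     else:
--         bounds = [0] + [i for i, c in enumerate(word) if not c.islower()] + [len(word)]
--         subwords = [word[a:b].lower() for a, b in zip(bounds, bounds[1:])]
--     letters = [c for c in word if c.isalpha()]
--     if letters and all(c.isupper() for c in letters):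
--         subwords = [ALL_CAPS] + subwords
--     return subwords
-- ===== Notes on version B (the rewrite author's own statement) =====
-- stated objective: idiomatic
-- what changed: The manual camelCase accumulator loop is replaced by computing the cut indices (positions of non-lowercase characters) and slicing the word between consecutive bounds, and the final ALL_CAPS double-scan (all/any) is replaced by a single filter of the alphabetic characters.
import Mathlib
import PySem

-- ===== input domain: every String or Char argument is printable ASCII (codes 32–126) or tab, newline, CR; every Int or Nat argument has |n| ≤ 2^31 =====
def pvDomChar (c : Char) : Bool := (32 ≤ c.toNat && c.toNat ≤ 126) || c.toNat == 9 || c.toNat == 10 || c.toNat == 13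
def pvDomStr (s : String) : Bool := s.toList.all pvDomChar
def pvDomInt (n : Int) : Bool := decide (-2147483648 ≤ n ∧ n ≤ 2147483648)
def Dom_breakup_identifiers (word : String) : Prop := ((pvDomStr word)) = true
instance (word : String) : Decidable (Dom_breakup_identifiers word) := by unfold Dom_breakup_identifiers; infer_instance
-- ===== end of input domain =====

-- B replaces A's manual camelCase accumulator loop by computing the cut positions
-- (indices of non-lowercase chars) and slicing the word between consecutive bounds,
-- and replaces the final ALL_CAPS double-scan by a single filter of the letters
-- (objective: more idiomatic; same behaviour, same asymptotic cost).

def pvSpecialPrefix : String := "~!~$"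

def pvAllCaps : String := "~!~$all_caps"

-- ===== PORT A =====
def breakup_identifiers (word : String) : List String :=
  if PySem.Str.startswith word pvSpecialPrefix then [word]
  else
    let subwords : List String :=
      if PySem.Str.isIn "_" word then
        (PySem.Str.split? (PySem.Str.lower word) "_").getD []
      else if word.toList.all (fun c => PySem.Chars.isupper c) then
        [PySem.Str.lower word]
      else
        -- the loop: current_word accumulates lowered chars, flushed at non-lowercase chars
        let st := word.toList.foldl
          (fun (st : List (List Char) × List Char) char =>
            let st := if !(PySem.Chars.islower char) then (st.1 ++ [st.2], ([] : List Char)) else st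
            (st.1, st.2 ++ [PySem.Chars.lowerChar char])) ([], [])
        (st.1 ++ [st.2]).map String.ofList
    if (word.toList.all (fun c => !PySem.Chars.isalpha c || PySem.Chars.isupper c))
        && (word.toList.any (fun c => PySem.Chars.isalpha c)) then
      pvAllCaps :: subwords
    else subwords

-- ===== PORT B =====
def breakup_identifiers_alt (word : String) : List String :=
  if PySem.Str.startswith word pvSpecialPrefix then [word]
  else
    let subwords : List String :=
      if PySem.Str.isIn "_" word then
        (PySem.Str.split? (PySem.Str.lower word) "_").getD []
      else if word.toList.all (fun c => PySem.Chars.isupper c) then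
        [PySem.Str.lower word]
      else
        let cs := word.toList
        let bounds : List Int :=
          0 :: ((PySem.List.enumerate cs 0).filter (fun p => !PySem.Chars.islower p.2)).map (·.1)
            ++ [(cs.length : Int)]
        (bounds.zip (PySem.List.slice bounds (some 1) none)).map
          (fun p => String.ofList (PySem.Chars.lower (PySem.List.slice cs (some p.1) (some p.2))))
    let letters := word.toList.filter (fun c => PySem.Chars.isalpha c)
    if !letters.isEmpty && letters.all (fun c => PySem.Chars.isupper c) then
      pvAllCaps :: subwords
    else subwords

-- ===== PRECONDITION & SPEC =====
def Spec_breakup_identifiers (word : String) (out : List String) : Prop := out = breakup_identifiers_alt word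
instance (word : String) (out : List String) : Decidable (Spec_breakup_identifiers word out) := by unfold Spec_breakup_identifiers; infer_instance

-- ===== CLAIM (what is proved, stated in full; the proofs are below) =====
def Claim_equal_breakup_identifiers : Prop := ∀ (word : String), Dom_breakup_identifiers word → Spec_breakup_identifiers word (breakup_identifiers word)

-- ===== LEMMAS AND PROOFS =====

-- raw segmentation: head = leading lowercase run, then one non-lowercase char + following run
def splitRaw : List Char → List Char → List (List Char)
  | cur, [] => [cur]
  | cur, c :: cs =>
    if PySem.Chars.islower c then splitRaw (cur ++ [c]) cs
    else cur :: splitRaw [c] cs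

-- same but lowering each char as A's loop does
def segsFrom : List Char → List Char → List (List Char)
  | cur, [] => [cur]
  | cur, c :: cs =>
    if PySem.Chars.islower c then segsFrom (cur ++ [PySem.Chars.lowerChar c]) cs
    else cur :: segsFrom [PySem.Chars.lowerChar c] cs

def zipPairs (L : Int) : Int → List Int → List (Int × Int)
  | a, [] => [(a, L)]
  | a, k :: ks => (a, k) :: zipPairs L k ks

theorem foldl_segs (cs : List Char) : ∀ (subs : List (List Char)) (cur : List Char),
    (let r := cs.foldl
      (fun (st : List (List Char) × List Char) char =>
        let st := if !(PySem.Chars.islower char) then (st.1 ++ [st.2], ([] : List Char)) else st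
        (st.1, st.2 ++ [PySem.Chars.lowerChar char])) (subs, cur)
     r.1 ++ [r.2]) = subs ++ segsFrom cur cs := by
  induction cs with
  | nil => intro subs cur; simp [segsFrom]
  | cons c cs ih =>
    intro subs cur
    by_cases h : PySem.Chars.islower c
    · have := ih subs (cur ++ [PySem.Chars.lowerChar c])
      simp only [List.foldl_cons]
      simp [segsFrom, h]
      simpa using this
    · have := ih (subs ++ [cur]) [PySem.Chars.lowerChar c]
      simp only [List.foldl_cons]
      simp [segsFrom, h]
      simpa using this
theorem segsFrom_eq_splitRaw (cs : List Char) : ∀ cur : List Char,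
    segsFrom (cur.map PySem.Chars.lowerChar) cs
      = (splitRaw cur cs).map (List.map PySem.Chars.lowerChar) := by
  induction cs with
  | nil => intro cur; simp [segsFrom, splitRaw]
  | cons c cs ih =>
    intro cur
    by_cases h : PySem.Chars.islower c
    · simp only [segsFrom, splitRaw, if_pos h]
      have := ih (cur ++ [c])
      simpa using this
    · simp only [segsFrom, splitRaw, if_neg h, List.map_cons]
      have := ih [c]
      simpa using this

theorem zip_tail_eq_zipPairs (L : Int) : ∀ (ks : List Int) (a : Int),
    ((a :: (ks ++ [L])).zip (ks ++ [L])) = zipPairs L a ks := by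
  intro ks
  induction ks with
  | nil => intro a; simp [zipPairs]
  | cons k ks ih => intro a; simp only [List.cons_append, List.zip_cons_cons, zipPairs]; rw [← List.cons_append]; exact congrArg _ (ih k)

theorem slices_eq_splitRaw (w : List Char) : ∀ (ds : List Char) (s a : Nat),
    a ≤ s → s + ds.length = w.length → w.drop s = ds →
    (zipPairs (w.length : Int) (a : Int)
        (((PySem.List.enumerate ds (s : Int)).filter (fun p => !PySem.Chars.islower p.2)).map (·.1))).map
      (fun p => PySem.List.slice w (some p.1) (some p.2))
    = splitRaw ((w.drop a).take (s - a)) ds := by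
  intro ds
  induction ds with
  | nil =>
    intro s a ha hlen hdrop
    have hs : s = w.length := by simpa using hlen
    simp only [PySem.List.enumerate_nil, List.filter_nil, List.map_nil, zipPairs, List.map_cons,
      List.map_nil, splitRaw]
    rw [PySem.List.slice_natCast]
    have h1 : (w.drop a).length = w.length - a := by simp
    have : (w.drop a).take (w.length - a) = w.drop a := by
      rw [← h1]; exact List.take_length
    simp [hs, this]
  | cons c ds ih =>
    intro s a ha hlen hdrop
    have hslen : s < w.length := by simp at hlen; omega
    have hwc : w[s]? = some c := by
      have : (w.drop s)[0]? = some c := by rw [hdrop]; rfl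
      simpa using this
    have hdrop' : w.drop (s + 1) = ds := by
      have : (w.drop s).tail = w.drop (s + 1) := by
        rw [List.tail_drop]
      rw [← this, hdrop]; rfl
    have hlen' : (s + 1) + ds.length = w.length := by simp at hlen ⊢; omega
    rw [PySem.List.enumerate_cons]
    by_cases h : PySem.Chars.islower c
    · -- no cut here: current segment extends
      simp only [List.filter_cons, h, Bool.not_true, List.map_cons]
      have heq := ih (s + 1) a (by omega) hlen' hdrop'
      have hcast : ((s : Int) + 1) = ((s + 1 : Nat) : Int) := by push_cast; ring
      rw [if_neg (by simp)]
      rw [hcast, heq]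
      -- splitRaw cur (c :: ds) with islower c
      have hseg : (w.drop a).take (s + 1 - a) = (w.drop a).take (s - a) ++ [c] := by
        have h2 : s + 1 - a = (s - a) + 1 := by omega
        rw [h2, List.take_succ]
        have : (w.drop a)[s - a]? = some c := by
          rw [List.getElem?_drop]
          have : a + (s - a) = s := by omega
          rw [this, hwc]
        simp [this]
      rw [hseg]
      conv_rhs => rw [splitRaw, if_pos h]
    · simp only [List.filter_cons]
      rw [if_pos (by simp [Bool.not_eq_true] at h ⊢; exact h)]
      simp only [List.map_cons, zipPairs, List.map_cons]
      have heq := ih (s + 1) s (by omega) hlen' hdrop'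
      have hcast : ((s : Int) + 1) = ((s + 1 : Nat) : Int) := by push_cast; ring
      rw [hcast, heq]
      have hhead : PySem.List.slice w (some (a : Int)) (some (s : Int)) = (w.drop a).take (s - a) := by
        rw [PySem.List.slice_natCast]
      have hone : (w.drop s).take (s + 1 - s) = [c] := by
        have : s + 1 - s = 1 := by omega
        rw [this, hdrop]; rfl
      rw [hhead, hone]
      conv_rhs => rw [splitRaw, if_neg h]

theorem allcaps_cond (cs : List Char) :
    ((cs.all (fun c => !PySem.Chars.isalpha c || PySem.Chars.isupper c))
        && (cs.any (fun c => PySem.Chars.isalpha c)))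
    = (!(cs.filter (fun c => PySem.Chars.isalpha c)).isEmpty
        && (cs.filter (fun c => PySem.Chars.isalpha c)).all (fun c => PySem.Chars.isupper c)) := by
  induction cs with
  | nil => rfl
  | cons c cs ih =>
    by_cases h : PySem.Chars.isalpha c
    · by_cases hu : PySem.Chars.isupper c <;>
        simp [List.filter_cons, h, hu, List.all_cons, List.any_cons, ih] <;> tauto
    · simp [List.filter_cons, h, List.all_cons, List.any_cons, ih]

theorem lower_eq_map (l : List Char) : PySem.Chars.lower l = l.map PySem.Chars.lowerChar := by
  simp [PySem.Chars.lower]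

theorem loop_eq_slices (w : List Char) :
    (let st := w.foldl
        (fun (st : List (List Char) × List Char) char =>
          let st := if !(PySem.Chars.islower char) then (st.1 ++ [st.2], ([] : List Char)) else st
          (st.1, st.2 ++ [PySem.Chars.lowerChar char])) ([], [])
     (st.1 ++ [st.2]).map String.ofList)
    = (let cs := w
       let bounds : List Int :=
         0 :: ((PySem.List.enumerate cs 0).filter (fun p => !PySem.Chars.islower p.2)).map (·.1)
           ++ [(cs.length : Int)]
       (bounds.zip (PySem.List.slice bounds (some 1) none)).map
         (fun p => String.ofList (PySem.Chars.lower (PySem.List.slice cs (some p.1) (some p.2))))) := by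
  have hA := foldl_segs w [] []
  have hA2 := segsFrom_eq_splitRaw w []
  simp only [List.map_nil, List.nil_append] at hA hA2
  have hB := slices_eq_splitRaw w w 0 0 (le_refl 0) (by simp) (by simp)
  simp only []
  rw [PySem.List.slice_from_one]
  rw [show ((((0 : Int) :: ((PySem.List.enumerate w 0).filter (fun p => !PySem.Chars.islower p.2)).map (·.1))
        ++ [(w.length : Int)]).tail)
      = ((PySem.List.enumerate w 0).filter (fun p => !PySem.Chars.islower p.2)).map (·.1)
        ++ [(w.length : Int)] from by simp]
  rw [List.cons_append, zip_tail_eq_zipPairs]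
  have hmap : ∀ (ps : List (Int × Int)),
      ps.map (fun p => String.ofList (PySem.Chars.lower (PySem.List.slice w (some p.1) (some p.2))))
      = (ps.map (fun p => PySem.List.slice w (some p.1) (some p.2))).map
          (fun l => String.ofList (PySem.Chars.lower l)) := by
    intro ps; rw [List.map_map]; rfl
  rw [hmap]
  have h0 : ((0 : Nat) : Int) = (0 : Int) := rfl
  rw [← h0, hB]
  simp only [Nat.sub_self, List.take_zero, List.drop_zero] at *
  rw [hA, hA2, List.map_map]
  apply List.map_congr_left
  intro l _
  simp [lower_eq_map]

-- ===== VERDICT (by name: the statement is the Claim_ definition above) =====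
theorem breakup_identifiers_spec : Claim_equal_breakup_identifiers := by
  intro word _
  unfold Spec_breakup_identifiers breakup_identifiers breakup_identifiers_alt
  rw [allcaps_cond]
  by_cases h1 : PySem.Str.startswith word pvSpecialPrefix = true
  · rw [if_pos h1, if_pos h1]
  · rw [if_neg h1, if_neg h1]
    exact congrArg
      (fun sw => if (!(word.toList.filter (fun c => PySem.Chars.isalpha c)).isEmpty
          && (word.toList.filter (fun c => PySem.Chars.isalpha c)).all (fun c => PySem.Chars.isupper c)) = true
        then pvAllCaps :: sw else sw)
      (if_congr Iff.rfl rfl (if_congr Iff.rfl rfl (loop_eq_slices word.toList)))
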